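-- pv_equiv track=rewrite | github.com/guo-xuan/SiprosBenchmark | src/Settings.py | get_protein_type
-- ===== SOURCE A (Python) =====
-- label_train_str = 'Rev_'
--
-- label_test_str = 'TestRev_'
--
-- label_reserve_str = 'Rev_2_'
--
-- LabelFwd = 1
--
-- LabelRevTrain = 2
--
-- LabelRevReserve = 3
--
-- LabelTest = 4
--
-- def get_protein_type(protein_split_list):
--     for one_protein in protein_split_list:
--         if not (one_protein.startswith(label_train_str) or one_protein.startswith(label_test_str)):
--             return LabelFwd
--     for one_protein in protein_split_list:
--         if one_protein.startswith(label_test_str):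
--             return LabelTest
--     if label_reserve_str != '':
--         for one_protein in protein_split_list:
--             if one_protein.startswith(label_reserve_str):
--                 return LabelRevReserve
--     return LabelRevTrain
-- ===== SOURCE B (Python) =====
-- LabelFwd = 1
-- LabelRevTrain = 2
-- LabelRevReserve = 3
-- LabelTest = 4
--
-- def get_protein_type(protein_split_list):
--     has_test = False
--     has_reserve = False
--     for p in protein_split_list:
--         if not (p.startswith('Rev_') or p.startswith('TestRev_')):
--             return LabelFwd
--         if p.startswith('TestRev_'):
--             has_test = True
--         if p.startswith('Rev_2_'):
--             has_reserve = True
--     if has_test: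
--         return LabelTest
--     if has_reserve:
--         return LabelRevReserve
--     return LabelRevTrain
-- ===== Notes on version B (the rewrite author's own statement) =====
-- stated objective: simpler
-- what changed: Replaces A's three sequential scans (forward check, TestRev_ scan, Rev_2_ scan) with one single pass that flags has_test/has_reserve and decides at the end.
import Mathlib
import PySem

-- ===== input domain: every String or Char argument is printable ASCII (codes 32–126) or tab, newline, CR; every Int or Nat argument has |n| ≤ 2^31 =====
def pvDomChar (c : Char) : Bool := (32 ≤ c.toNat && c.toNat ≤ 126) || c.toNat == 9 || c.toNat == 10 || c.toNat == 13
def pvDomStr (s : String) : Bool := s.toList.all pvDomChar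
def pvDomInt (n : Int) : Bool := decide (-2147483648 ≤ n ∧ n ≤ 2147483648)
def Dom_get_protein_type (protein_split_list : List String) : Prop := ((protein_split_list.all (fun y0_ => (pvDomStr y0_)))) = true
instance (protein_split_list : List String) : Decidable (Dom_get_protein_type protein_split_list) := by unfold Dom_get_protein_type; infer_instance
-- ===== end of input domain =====

-- B replaces A's three sequential scans by one single pass tracking two flags (simpler; same priority Fwd > Test > Reserve > Train).

-- ===== PORT A =====
-- first loop: return LabelFwd at the first protein not starting with 'Rev_' nor 'TestRev_'
def pvALoop1 : List String → Option Int
  | [] => none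
  | p :: rest =>
    if !(PySem.Str.startswith p "Rev_" || PySem.Str.startswith p "TestRev_") then some 1
    else pvALoop1 rest

-- second loop: return LabelTest at the first protein starting with 'TestRev_'
def pvALoop2 : List String → Option Int
  | [] => none
  | p :: rest => if PySem.Str.startswith p "TestRev_" then some 4 else pvALoop2 rest

-- third loop: return LabelRevReserve at the first protein starting with 'Rev_2_'
def pvALoop3 : List String → Option Int
  | [] => none
  | p :: rest => if PySem.Str.startswith p "Rev_2_" then some 3 else pvALoop3 rest

def get_protein_type (protein_split_list : List String) : Int :=
  match pvALoop1 protein_split_list with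
  | some v => v
  | none =>
    match pvALoop2 protein_split_list with
    | some v => v
    | none =>
      if ("Rev_2_" : String) ≠ "" then
        match pvALoop3 protein_split_list with
        | some v => v
        | none => 2
      else 2

-- ===== PORT B =====
-- single pass: early return LabelFwd, otherwise accumulate has_test / has_reserve flags
def pvBLoop : List String → Bool → Bool → Int
  | [], has_test, has_reserve =>
    if has_test then 4 else if has_reserve then 3 else 2
  | p :: rest, has_test, has_reserve =>
    if !(PySem.Str.startswith p "Rev_" || PySem.Str.startswith p "TestRev_") then 1
    else pvBLoop rest
      (if PySem.Str.startswith p "TestRev_" then true else has_test)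
      (if PySem.Str.startswith p "Rev_2_" then true else has_reserve)

def get_protein_type_alt (protein_split_list : List String) : Int :=
  pvBLoop protein_split_list false false

-- ===== PRECONDITION & SPEC =====
def Spec_get_protein_type (protein_split_list : List String) (out : Int) : Prop := out = get_protein_type_alt protein_split_list
instance (protein_split_list : List String) (out : Int) : Decidable (Spec_get_protein_type protein_split_list out) := by unfold Spec_get_protein_type; infer_instance

-- ===== CLAIM (what is proved, stated in full; the proofs are below) =====
def Claim_equal_get_protein_type : Prop := ∀ (protein_split_list : List String), Dom_get_protein_type protein_split_list → Spec_get_protein_type protein_split_list (get_protein_type protein_split_list)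

-- ===== LEMMAS AND PROOFS =====

lemma pvALoop2_eq (l : List String) :
    pvALoop2 l = if l.any (fun p => PySem.Str.startswith p "TestRev_") then some 4 else none := by
  induction l with
  | nil => simp [pvALoop2]
  | cons p rest ih =>
    simp only [pvALoop2, List.any_cons, ih]
    simp only [Bool.or_eq_true]
    split_ifs <;> tauto

lemma pvALoop3_eq (l : List String) :
    pvALoop3 l = if l.any (fun p => PySem.Str.startswith p "Rev_2_") then some 3 else none := by
  induction l with
  | nil => simp [pvALoop3]
  | cons p rest ih =>
    simp only [pvALoop3, List.any_cons, ih]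
    simp only [Bool.or_eq_true]
    split_ifs <;> tauto

lemma pvBLoop_eq (l : List String) : ∀ (ht hr : Bool),
    pvBLoop l ht hr =
      match pvALoop1 l with
      | some v => v
      | none =>
        if ht || l.any (fun p => PySem.Str.startswith p "TestRev_") then 4
        else if hr || l.any (fun p => PySem.Str.startswith p "Rev_2_") then 3 else 2 := by
  induction l with
  | nil => intro ht hr; cases ht <;> cases hr <;> simp [pvBLoop, pvALoop1]
  | cons p rest ih =>
    intro ht hr
    simp only [pvBLoop, pvALoop1, List.any_cons, ih]
    simp only [Bool.or_eq_true, Bool.not_eq_true', Bool.or_eq_false_iff]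
    by_cases hf : PySem.Str.startswith p "Rev_" = false ∧
        PySem.Str.startswith p "TestRev_" = false
    · rw [if_pos hf, if_pos hf]
    · rw [if_neg hf, if_neg hf]
      cases hA : pvALoop1 rest with
      | some v => rfl
      | none =>
        cases h2 : PySem.Str.startswith p "TestRev_" <;>
          cases h3 : PySem.Str.startswith p "Rev_2_" <;> simp

-- ===== VERDICT (by name: the statement is the Claim_ definition above) =====
theorem get_protein_type_spec : Claim_equal_get_protein_type := by
  intro l _
  unfold Spec_get_protein_type get_protein_type get_protein_type_alt
  rw [pvBLoop_eq, pvALoop2_eq, pvALoop3_eq]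
  cases h1 : pvALoop1 l with
  | some v => rfl
  | none =>
    simp only [Bool.false_or, List.any_eq_true]
    split_ifs <;> tauto
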